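-- pv_equiv track=rewrite | github.com/SyedMazhar6746/Lidar-Based-Exploration-and-Navigation-with-Cartographer-SLAM | src/rrt_planner.py | generate_offsets
-- ===== SOURCE A (Python) =====
-- def generate_offsets(num_layers):
--     offsets = []
--     for layer in range(1, num_layers + 1):
--         for dx in range(-layer, layer + 1):
--             for dy in range(-layer, layer + 1):
--                 if abs(dx) == layer or abs(dy) == layer:  # Only outer edge of the layer
--                     offsets.append([dx, dy])
--     return offsets
-- ===== SOURCE B (Python) =====
-- def generate_offsets(num_layers):
--     # Emit only the perimeter cells of each layer directly, in A's order.
--     offsets = []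
--     for layer in range(1, num_layers + 1):
--         for dy in range(-layer, layer + 1):      # left column dx = -layer
--             offsets.append([-layer, dy])
--         for dx in range(-layer + 1, layer):      # middle rows: only edge dys
--             offsets.append([dx, -layer])
--             offsets.append([dx, layer])
--         for dy in range(-layer, layer + 1):      # right column dx = layer
--             offsets.append([layer, dy])
--     return offsets
-- ===== Notes on version B (the rewrite author's own statement) =====
-- stated objective: faster
-- what changed: B emits only the perimeter cells of each square ring directly (full left/right columns plus the two edge cells of each middle row) instead of scanning the whole (2*layer+1)^2 square and filtering, removing the inner dy scan for interior dx.
import Mathlib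
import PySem

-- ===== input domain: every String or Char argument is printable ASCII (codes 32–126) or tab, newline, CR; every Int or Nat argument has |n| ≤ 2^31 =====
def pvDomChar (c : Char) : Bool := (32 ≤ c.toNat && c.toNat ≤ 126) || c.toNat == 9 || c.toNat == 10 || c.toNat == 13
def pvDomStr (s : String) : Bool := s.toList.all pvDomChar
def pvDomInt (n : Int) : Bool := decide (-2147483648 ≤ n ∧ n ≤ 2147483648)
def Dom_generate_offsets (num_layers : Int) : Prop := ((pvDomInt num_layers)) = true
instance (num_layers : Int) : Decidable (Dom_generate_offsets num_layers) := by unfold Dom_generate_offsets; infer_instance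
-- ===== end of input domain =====

-- B emits only the perimeter cells of each square ring directly instead of scanning the whole square and filtering (objective: faster, measured).


-- ===== PORT A =====
def generate_offsets (num_layers : Int) : List (List Int) :=
  (PySem.List.pyRange 1 (num_layers + 1) 1).foldl (fun offsets layer =>
    (PySem.List.pyRange (-layer) (layer + 1) 1).foldl (fun acc dx =>
      (PySem.List.pyRange (-layer) (layer + 1) 1).foldl (fun acc2 dy =>
        if |dx| == layer || |dy| == layer then acc2 ++ [[dx, dy]] else acc2) acc) offsets) []

-- ===== PORT B =====
def generate_offsets_alt (num_layers : Int) : List (List Int) :=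
  (PySem.List.pyRange 1 (num_layers + 1) 1).foldl (fun offsets layer =>
    let s1 := (PySem.List.pyRange (-layer) (layer + 1) 1).foldl
      (fun acc dy => acc ++ [[-layer, dy]]) offsets
    let s2 := (PySem.List.pyRange (-layer + 1) layer 1).foldl
      (fun acc dx => acc ++ [[dx, -layer], [dx, layer]]) s1
    (PySem.List.pyRange (-layer) (layer + 1) 1).foldl
      (fun acc dy => acc ++ [[layer, dy]]) s2) []

-- ===== PRECONDITION & SPEC =====
def Spec_generate_offsets (num_layers : Int) (out : List (List Int)) : Prop := out = generate_offsets_alt num_layers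
instance (num_layers : Int) (out : List (List Int)) : Decidable (Spec_generate_offsets num_layers out) := by unfold Spec_generate_offsets; infer_instance

-- ===== CLAIM (what is proved, stated in full; the proofs are below) =====
def Claim_equal_generate_offsets : Prop := ∀ (num_layers : Int), Dom_generate_offsets num_layers → Spec_generate_offsets num_layers (generate_offsets num_layers)

-- ===== LEMMAS AND PROOFS =====

-- ===== VERDICT (by name: the statement is the Claim_ definition above) =====
-- per-layer equality: A's filtered full-square scan equals B's direct perimeter rows
lemma filt_mid (L dx : Int) (hL : 1 ≤ L) (h1 : -L + 1 ≤ dx) (h2 : dx < L) :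
    ([-L] ++ (PySem.List.pyRange (-L + 1) L 1 ++ [L])).filter
      (fun dy => |dx| == L || |dy| == L) = [-L, L] := by
  have hdx : (|dx| == L) = false := by
    rcases abs_cases dx with ⟨h, _⟩ | ⟨h, _⟩ <;> simp [h] <;> omega
  have hmid : (PySem.List.pyRange (-L + 1) L 1).filter (fun dy => |dx| == L || |dy| == L) = [] := by
    refine List.filter_eq_nil_iff.mpr (fun a ha => ?_)
    have := (PySem.List.mem_pyRange_one).1 ha
    rcases abs_cases a with ⟨h, _⟩ | ⟨h, _⟩ <;> simp [hdx, h] <;> omega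
  have hLL : (|L| == L) = true := by simp [abs_of_nonneg (by omega : (0 : Int) ≤ L)]
  rw [List.filter_append, List.filter_append, hmid]
  simp [hdx, hLL]

lemma layer_eq (layer : Int) (hL : 1 ≤ layer) (offsets : List (List Int)) :
    (PySem.List.pyRange (-layer) (layer + 1) 1).foldl (fun acc dx =>
      (PySem.List.pyRange (-layer) (layer + 1) 1).foldl (fun acc2 dy =>
        if |dx| == layer || |dy| == layer then acc2 ++ [[dx, dy]] else acc2) acc) offsets
    =
    (let s1 := (PySem.List.pyRange (-layer) (layer + 1) 1).foldl
        (fun acc dy => acc ++ [[-layer, dy]]) offsets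
     let s2 := (PySem.List.pyRange (-layer + 1) layer 1).foldl
        (fun acc dx => acc ++ [[dx, -layer], [dx, layer]]) s1
     (PySem.List.pyRange (-layer) (layer + 1) 1).foldl
        (fun acc dy => acc ++ [[layer, dy]]) s2) := by
  have hs1 : PySem.List.pyRange (-layer) (layer + 1) 1
      = PySem.List.pyRange (-layer) (-layer + 1) 1 ++ PySem.List.pyRange (-layer + 1) (layer + 1) 1 :=
    PySem.List.pyRange_one_append _ _ _ (by omega) (by omega)
  have hs2 : PySem.List.pyRange (-layer + 1) (layer + 1) 1
      = PySem.List.pyRange (-layer + 1) layer 1 ++ PySem.List.pyRange layer (layer + 1) 1 :=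
    PySem.List.pyRange_one_append _ _ _ (by omega) (by omega)
  have hLL : (|layer| == layer) = true := by
    simp [abs_of_nonneg (by omega : (0 : Int) ≤ layer)]
  simp only [PySem.List.foldl_append_singleton_eq_map]
  simp only [PySem.List.foldl_append_if, PySem.List.foldl_append_eq_flatMap]
  rw [hs1, hs2, PySem.List.pyRange_one_singleton, PySem.List.pyRange_one_singleton]
  have hmidflat : (PySem.List.pyRange (-layer + 1) layer 1).flatMap
      (fun dx => (([-layer] ++ (PySem.List.pyRange (-layer + 1) layer 1 ++ [layer])).filter
        (fun dy => |dx| == layer || |dy| == layer)).map (fun dy => [dx, dy]))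
      = (PySem.List.pyRange (-layer + 1) layer 1).flatMap
        (fun dx => [[dx, -layer], [dx, layer]]) := by
    rw [List.flatMap_def, List.flatMap_def]
    congr 1
    refine List.map_congr_left (fun dx hdx => ?_)
    have hm := (PySem.List.mem_pyRange_one).1 hdx
    rw [filt_mid layer dx hL hm.1 hm.2]
    rfl
  rw [List.flatMap_append, List.flatMap_append, hmidflat]
  simp [hLL, List.append_assoc]

theorem generate_offsets_spec : Claim_equal_generate_offsets := by
  intro n _
  unfold Spec_generate_offsets generate_offsets generate_offsets_alt
  refine PySem.List.foldl_congr_mem _ _ _ _ (fun offsets layer hmem => ?_)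
  have hL : 1 ≤ layer := ((PySem.List.mem_pyRange_one).1 hmem).1
  exact layer_eq layer hL offsets
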